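-- pv_equiv track=rewrite | github.com/ansolwork/tailoring-api | app/make_alteration.py | find_vertex_indices
-- ===== SOURCE A (Python) =====
-- def find_vertex_indices(vertices_list, first_point, second_point):
--     first_index = None
--     second_index = None
--     for i, vertex in enumerate(vertices_list):
--         if vertex == first_point:
--             first_index = i
--         if vertex == second_point:
--             second_index = i
--     return first_index, second_index
-- ===== SOURCE B (Python) =====
-- def find_vertex_indices(vertices_list, first_point, second_point):
--     first_index = None
--     second_index = None
--     for i in range(len(vertices_list) - 1, -1, -1):
--         vertex = vertices_list[i]
--         if first_index is None and vertex == first_point: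
--             first_index = i
--         if second_index is None and vertex == second_point:
--             second_index = i
--         if first_index is not None and second_index is not None:
--             break
--     return first_index, second_index
-- ===== Notes on version B (the rewrite author's own statement) =====
-- stated objective: alternative
-- what changed: B scans the list backwards and stops as soon as both points are seen (the first backward hit is the last forward occurrence), instead of A's full forward scan that keeps overwriting both indices.
import Mathlib
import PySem

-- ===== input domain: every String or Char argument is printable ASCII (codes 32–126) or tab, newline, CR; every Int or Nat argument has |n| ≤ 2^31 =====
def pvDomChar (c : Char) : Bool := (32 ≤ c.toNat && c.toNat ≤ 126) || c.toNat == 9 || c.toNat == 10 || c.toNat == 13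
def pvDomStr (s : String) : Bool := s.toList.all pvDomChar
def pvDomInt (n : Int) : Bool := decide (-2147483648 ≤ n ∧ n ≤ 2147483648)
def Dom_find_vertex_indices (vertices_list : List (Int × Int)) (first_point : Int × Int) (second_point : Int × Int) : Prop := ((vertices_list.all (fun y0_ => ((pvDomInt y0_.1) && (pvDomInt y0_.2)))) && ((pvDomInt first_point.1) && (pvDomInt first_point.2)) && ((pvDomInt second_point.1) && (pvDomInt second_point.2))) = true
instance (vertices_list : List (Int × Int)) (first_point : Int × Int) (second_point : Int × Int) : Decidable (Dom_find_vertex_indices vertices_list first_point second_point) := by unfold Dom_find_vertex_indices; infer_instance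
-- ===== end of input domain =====

-- B replaces A's full forward scan by a backward scan that records each point's first
-- backward hit (= last forward occurrence) and breaks once both are found (objective: alternative).

-- ===== PORT A =====
-- 'for i, vertex in enumerate(vertices_list): if vertex == first_point: …; if vertex == second_point: …'
def find_vertex_indices (vertices_list : List (Int × Int)) (first_point : Int × Int) (second_point : Int × Int) : Option Int × Option Int :=
  (PySem.List.enumerate vertices_list).foldl
    (fun st iv =>
      let st1 := if iv.2 = first_point then (some iv.1, st.2) else st
      if iv.2 = second_point then (st1.1, some iv.1) else st1)
    (none, none)

-- ===== PORT B =====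
-- 'for i in range(len(vertices_list)-1, -1, -1): …; break when both found'
-- (i+1 case handles index i; vertices_list[i] is always in range, getD's default is never used)
def find_vertex_indices_go (l : List (Int × Int)) (fp sp : Int × Int) :
    Nat → Option Int → Option Int → Option Int × Option Int
  | 0, fi, si => (fi, si)
  | i+1, fi, si =>
    let v := l.getD i (0, 0)
    let fi' := if fi = none ∧ v = fp then some (i : Int) else fi
    let si' := if si = none ∧ v = sp then some (i : Int) else si
    if fi' ≠ none ∧ si' ≠ none then (fi', si')
    else find_vertex_indices_go l fp sp i fi' si'

def find_vertex_indices_alt (vertices_list : List (Int × Int)) (first_point : Int × Int) (second_point : Int × Int) : Option Int × Option Int :=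
  find_vertex_indices_go vertices_list first_point second_point vertices_list.length none none

-- ===== PRECONDITION & SPEC =====
def Spec_find_vertex_indices (vertices_list : List (Int × Int)) (first_point : Int × Int) (second_point : Int × Int) (out : Option Int × Option Int) : Prop := out = find_vertex_indices_alt vertices_list first_point second_point
instance (vertices_list : List (Int × Int)) (first_point : Int × Int) (second_point : Int × Int) (out : Option Int × Option Int) : Decidable (Spec_find_vertex_indices vertices_list first_point second_point out) := by unfold Spec_find_vertex_indices; infer_instance

-- ===== CLAIM (what is proved, stated in full; the proofs are below) =====
def Claim_equal_find_vertex_indices : Prop := ∀ (vertices_list : List (Int × Int)) (first_point : Int × Int) (second_point : Int × Int), Dom_find_vertex_indices vertices_list first_point second_point → Spec_find_vertex_indices vertices_list first_point second_point (find_vertex_indices vertices_list first_point second_point)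

-- ===== LEMMAS AND PROOFS =====

-- last index (≥ k offset) of p in l: later occurrences dominate
def lfind : List (Int × Int) → (Int × Int) → Int → Option Int
  | [], _, _ => none
  | v :: t, p, k => (lfind t p (k+1)).or (if v = p then some k else none)

theorem lfind_append_singleton (xs : List (Int × Int)) (v p : Int × Int) (k : Int) :
    lfind (xs ++ [v]) p k = (if v = p then some (k + (xs.length : Int)) else none).or (lfind xs p k) := by
  induction xs generalizing k with
  | nil => simp [lfind]
  | cons x xs ih =>
    simp only [List.cons_append, lfind, ih, Option.or_assoc, List.length_cons]
    have h : k + 1 + (xs.length : Int) = k + ((xs.length + 1 : Nat) : Int) := by push_cast; ring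
    rw [h]

theorem foldA_enum (l : List (Int × Int)) (fp sp : Int × Int) (k : Int) (f0 s0 : Option Int) :
    (PySem.List.enumerate l k).foldl
      (fun (st : Option Int × Option Int) (iv : Int × (Int × Int)) =>
        let st1 := if iv.2 = fp then (some iv.1, st.2) else st
        if iv.2 = sp then (st1.1, some iv.1) else st1)
      (f0, s0) = ((lfind l fp k).or f0, (lfind l sp k).or s0) := by
  induction l generalizing k f0 s0 with
  | nil => simp [lfind, PySem.List.enumerate]
  | cons v t ih =>
    rw [PySem.List.enumerate_cons]
    simp only [List.foldl_cons]
    split_ifs <;> rw [ih] <;> simp_all [lfind]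

theorem goB_eq (l : List (Int × Int)) (fp sp : Int × Int) :
    ∀ (i : Nat), i ≤ l.length → ∀ (fi si : Option Int),
      find_vertex_indices_go l fp sp i fi si =
        (fi.or (lfind (l.take i) fp 0), si.or (lfind (l.take i) sp 0)) := by
  intro i
  induction i with
  | zero => intro _ fi si; simp [find_vertex_indices_go, lfind]
  | succ i ih =>
    intro hle fi si
    have hi : i < l.length := Nat.lt_of_succ_le hle
    have hget : l.getD i (0, 0) = l[i] := List.getD_eq_getElem l (0,0) hi
    have htake : l.take (i+1) = l.take i ++ [l[i]] := by
      rw [List.take_add_one]; simp [List.getElem?_eq_getElem hi]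
    have hlen : ((l.take i).length : Int) = (i : Int) := by
      simp [List.length_take, Nat.min_eq_left (Nat.le_of_lt hi)]
    have hlf : ∀ p, lfind (l.take (i+1)) p 0 =
        (if l[i] = p then some (i : Int) else none).or (lfind (l.take i) p 0) := by
      intro p
      rw [htake, lfind_append_singleton]
      simp [List.length_take, Nat.min_eq_left hi.le]
    have hacc : ∀ (a : Option Int) (p : Int × Int),
        (if a = none ∧ l[i] = p then some (i : Int) else a) =
          a.or (if l[i] = p then some (i : Int) else none) := by
      intro a p
      cases a <;> split_ifs <;> simp_all
    simp only [find_vertex_indices_go, hget, hacc]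
    set fi' := fi.or (if l[i] = fp then some (i : Int) else none) with hfi'
    set si' := si.or (if l[i] = sp then some (i : Int) else none) with hsi'
    have key : ∀ p (a : Option Int),
        a.or (lfind (l.take (i+1)) p 0) =
          (a.or (if l[i] = p then some (i : Int) else none)).or (lfind (l.take i) p 0) := by
      intro p a; rw [hlf, Option.or_assoc]
    split_ifs with h
    · obtain ⟨h1, h2⟩ := h
      have e1 : fi' = fi.or (lfind (l.take (i+1)) fp 0) := by
        rw [key fp fi, ← hfi']
        cases hf : fi' with
        | none => exact absurd hf h1
        | some x => simp
      have e2 : si' = si.or (lfind (l.take (i+1)) sp 0) := by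
        rw [key sp si, ← hsi']
        cases hs : si' with
        | none => exact absurd hs h2
        | some x => simp
      rw [← e1, ← e2]
    · rw [ih (Nat.le_of_lt hle) fi' si', hfi', hsi', ← key fp fi, ← key sp si]

-- ===== VERDICT (by name: the statement is the Claim_ definition above) =====
theorem find_vertex_indices_spec : Claim_equal_find_vertex_indices := by
  intro l fp sp _
  unfold Spec_find_vertex_indices find_vertex_indices find_vertex_indices_alt
  rw [foldA_enum l fp sp 0 none none, goB_eq l fp sp l.length (le_refl _) none none]
  simp
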